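-- pv_equiv track=rewrite | github.com/ronnix/jeux-de-programmation | 03-advent-of-code-2018/day-06/part1.py | closest_locations
-- ===== SOURCE A (Python) =====
-- def manhattan_distance(p1, p2):
--     x1, y1 = p1
--     x2, y2 = p2
--     return abs(x1 - x2) + abs(y1 - y2)
--
-- def closest_locations(locations, coordinates):
--     distances = {
--         location: manhattan_distance(coordinates, location) for location in locations
--     }
--     shortest = min(distances.values())
--     return {
--         location for location, distance in distances.items() if distance == shortest
--     }
-- ===== SOURCE B (Python) =====
-- def closest_locations(locations, coordinates):
--     # One streaming pass: track the best distance so far and the set of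
--     # locations achieving it.
--     x, y = coordinates
--     best = None
--     result = set()
--     for lx, ly in locations:
--         d = abs(lx - x) + abs(ly - y)
--         if best is None or d < best:
--             best = d
--             result = {(lx, ly)}
--         elif d == best:
--             result.add((lx, ly))
--     return result
-- ===== Notes on version B (the rewrite author's own statement) =====
-- stated objective: simpler
-- what changed: Replaces the build-a-distance-dict-then-min-then-filter pipeline with a single streaming pass that tracks the best distance and the set of locations achieving it; Pre_ excludes the empty list, on which A's min([]) raises ValueError while B naturally returns the empty set.
import Mathlib
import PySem

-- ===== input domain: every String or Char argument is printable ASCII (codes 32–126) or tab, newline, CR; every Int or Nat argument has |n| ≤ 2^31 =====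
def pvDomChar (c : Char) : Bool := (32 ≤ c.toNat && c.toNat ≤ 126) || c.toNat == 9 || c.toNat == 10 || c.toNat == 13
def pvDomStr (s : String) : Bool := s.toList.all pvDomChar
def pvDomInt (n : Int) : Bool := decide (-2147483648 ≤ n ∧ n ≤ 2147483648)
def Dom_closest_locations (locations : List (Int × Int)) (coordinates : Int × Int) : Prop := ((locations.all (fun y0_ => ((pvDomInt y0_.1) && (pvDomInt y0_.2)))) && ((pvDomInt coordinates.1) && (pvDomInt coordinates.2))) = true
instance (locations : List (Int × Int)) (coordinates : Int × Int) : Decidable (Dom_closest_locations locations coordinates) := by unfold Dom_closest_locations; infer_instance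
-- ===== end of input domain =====

-- B replaces A's distance-dict + min + filter pipeline with one streaming pass tracking
-- the best distance and its location set (objective: simpler — no dict, single traversal).


-- ===== PORT A =====
def manhattan_distance (p1 p2 : Int × Int) : Int :=
  |p1.1 - p2.1| + |p1.2 - p2.2|

def closest_locations (locations : List (Int × Int)) (coordinates : Int × Int) : List (Int × Int) :=
  let distances : PySem.Dict (Int × Int) Int :=
    locations.foldl (fun d location => d.insert location (manhattan_distance coordinates location)) PySem.Dict.empty
  match PySem.List.min? distances.values (fun v => v) with
  | none => []  -- min([]) raises ValueError; excluded by Pre_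
  | some shortest =>
    distances.items.foldl
      (fun s p => if p.2 == shortest then PySem.Set.add s p.1 else s)
      PySem.Set.empty

-- ===== PORT B =====
def closest_locations_alt (locations : List (Int × Int)) (coordinates : Int × Int) : List (Int × Int) :=
  (locations.foldl
      (fun st location =>
        let d := |location.1 - coordinates.1| + |location.2 - coordinates.2|
        match st.1 with
        | none => (some d, [location])
        | some best =>
          if d < best then (some d, [location])
          else if d == best then (some best, PySem.Set.add st.2 location)
          else st)
      ((none : Option Int), (PySem.Set.empty : PySem.Set (Int × Int)))).2

-- ===== PRECONDITION & SPEC =====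
-- Pre_ excludes only the empty list, on which A's min([]) raises ValueError (B returns the empty set there).
def Pre_closest_locations (locations : List (Int × Int)) (coordinates : Int × Int) : Prop :=
  locations ≠ []
instance (locations : List (Int × Int)) (coordinates : Int × Int) : Decidable (Pre_closest_locations locations coordinates) := by unfold Pre_closest_locations; infer_instance

def pvWitness_closest_locations : (List (Int × Int)) × (Int × Int) := ([(1, 2), (3, 4), (0, 3)], (1, 3))

def Spec_closest_locations (locations : List (Int × Int)) (coordinates : Int × Int) (out : List (Int × Int)) : Prop := out = closest_locations_alt locations coordinates
instance (locations : List (Int × Int)) (coordinates : Int × Int) (out : List (Int × Int)) : Decidable (Spec_closest_locations locations coordinates out) := by unfold Spec_closest_locations; infer_instance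

-- ===== CLAIM (what is proved, stated in full; the proofs are below) =====
def Claim_equal_closest_locations : Prop := ∀ (locations : List (Int × Int)) (coordinates : Int × Int), Dom_closest_locations locations coordinates → Pre_closest_locations locations coordinates → Spec_closest_locations locations coordinates (closest_locations locations coordinates)

-- ===== LEMMAS AND PROOFS =====

theorem get?_foldl_insert_fn {α ν : Type} [BEq α] [LawfulBEq α] (g : α → ν)
    (l : List α) (d : PySem.Dict α ν) (k : α) :
    (l.foldl (fun d x => d.insert x (g x)) d).get? k
      = if k ∈ l then some (g k) else d.get? k := by
  induction l generalizing d with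
  | nil => simp
  | cons x t ih =>
    simp only [List.foldl_cons, ih, List.mem_cons]
    by_cases h2 : k = x
    · subst h2
      by_cases h1 : k ∈ t <;> simp [h1, PySem.Dict.get?_insert_self]
    · rw [PySem.Dict.get?_insert_of_ne _ _ h2]
      by_cases h1 : k ∈ t <;> simp [h1, h2]

theorem ofList_filter {α : Type} [BEq α] [LawfulBEq α] (p : α → Bool) (xs : List α) :
    PySem.Set.ofList (xs.filter p) = (PySem.Set.ofList xs).filter p := by
  induction xs using List.reverseRecOn with
  | nil => simp
  | append_singleton xs x ih =>
    rw [List.filter_append, PySem.Set.ofList_append_singleton]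
    by_cases hp : p x
    · have hfx : List.filter p [x] = [x] := by simp [hp]
      rw [hfx, PySem.Set.ofList_append_singleton, ih]
      by_cases hm : x ∈ xs
      · rw [PySem.Set.add_of_mem
              (List.mem_filter.mpr ⟨(PySem.Set.mem_ofList xs x).mpr hm, hp⟩),
            PySem.Set.add_of_mem ((PySem.Set.mem_ofList xs x).mpr hm)]
      · rw [PySem.Set.add_of_not_mem
              (fun h => hm ((PySem.Set.mem_ofList xs x).mp (List.mem_filter.mp h).1)),
            PySem.Set.add_of_not_mem (fun h => hm ((PySem.Set.mem_ofList _ x).mp h)),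
            List.filter_append, hfx]
    · have hfx : List.filter p [x] = [] := by simp [hp]
      rw [hfx, List.append_nil, ih]
      by_cases hm : x ∈ xs
      · rw [PySem.Set.add_of_mem ((PySem.Set.mem_ofList xs x).mpr hm)]
      · rw [PySem.Set.add_of_not_mem (fun h => hm ((PySem.Set.mem_ofList _ x).mp h)),
            List.filter_append, hfx, List.append_nil]

def bstep {α : Type} [BEq α] (f : α → Int)
    (st : Option Int × PySem.Set α) (x : α) : Option Int × PySem.Set α :=
  let d := f x
  match st.1 with
  | none => (some d, [x])
  | some best =>
    if d < best then (some d, [x])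
    else if d == best then (some best, PySem.Set.add st.2 x)
    else st

theorem b_fold {α : Type} [BEq α] [LawfulBEq α] (f : α → Int) (xs : List α) (m : Int)
    (hmem : m ∈ xs.map f) (hmin : ∀ y ∈ xs.map f, m ≤ y) :
    xs.foldl (bstep f) ((none : Option Int), (PySem.Set.empty : PySem.Set α))
      = (some m, PySem.Set.ofList (xs.filter (fun x => f x == m))) := by
  induction xs using List.reverseRecOn generalizing m with
  | nil => simp at hmem
  | append_singleton xs x ih =>
    rw [List.foldl_append]
    by_cases hxs : xs = []
    · subst hxs
      have hmx : m = f x := by simpa using hmem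
      subst hmx
      simp [bstep, PySem.Set.ofList]
    · obtain ⟨m', hm'⟩ : ∃ m', PySem.List.min? (xs.map f) (fun v => v) = some m' := by
        cases h : PySem.List.min? (xs.map f) (fun v => v) with
        | none =>
          rw [PySem.List.min?_eq_none_iff] at h
          exact absurd (List.map_eq_nil_iff.mp h) hxs
        | some m' => exact ⟨m', rfl⟩
      have hm'mem : m' ∈ xs.map f := PySem.List.min?_mem hm'
      have hm'min : ∀ y ∈ xs.map f, m' ≤ y := PySem.List.min?_isMin hm'
      have hmle : m ≤ m' := hmin m' (by simpa using Or.inl hm'mem)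
      have hmlex : m ≤ f x := hmin (f x) (by simp)
      have hcases : m ∈ xs.map f ∨ m = f x := by simpa using hmem
      rw [ih m' hm'mem hm'min]
      simp only [List.foldl_cons, List.foldl_nil, bstep]
      by_cases hlt : f x < m'
      · have hm : m = f x := by
          rcases hcases with h | h
          · exact absurd (lt_of_le_of_lt hmlex hlt) (not_lt.mpr (hm'min m h))
          · exact h
        have hnil : xs.filter (fun k => f k == m) = [] := by
          rw [List.filter_eq_nil_iff]
          intro k hk hb
          have : m' ≤ f k := hm'min (f k) (List.mem_map_of_mem hk)
          have : f k = m := by simpa using hb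
          omega
        rw [if_pos hlt, List.filter_append, hnil]
        subst hm
        simp [PySem.Set.ofList]
      · have hm : m = m' := by
          rcases hcases with h | h
          · exact le_antisymm hmle (hm'min m h)
          · omega
        subst hm
        by_cases heq : f x = m
        · rw [if_neg hlt, if_pos (by simpa using heq), List.filter_append]
          have : List.filter (fun k => f k == m) [x] = [x] := by simp [heq]
          rw [this, PySem.Set.ofList_append_singleton]
        · rw [if_neg hlt, if_neg (by simpa using heq), List.filter_append]
          have : List.filter (fun k => f k == m) [x] = [] := by simp [heq]
          rw [this, List.append_nil]

theorem main_eq (locations : List (Int × Int)) (coordinates : Int × Int)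
    (hpre : locations ≠ []) :
    closest_locations locations coordinates = closest_locations_alt locations coordinates := by
  set f : (Int × Int) → Int := fun l => manhattan_distance coordinates l with hf
  set S : PySem.Set (Int × Int) := PySem.Set.ofList locations with hS
  set distances : PySem.Dict (Int × Int) Int :=
    locations.foldl (fun d location => d.insert location (manhattan_distance coordinates location)) PySem.Dict.empty with hd
  have hkeys : distances.keys = S := by
    rw [hd, PySem.Dict.keys_foldl_insert]
    simp [PySem.Set.update_nil_left, hS]
  have hndS : S.Nodup := by
    rw [hS]; exact PySem.Set.nodup_ofList locations
  have hnd : distances.keys.Nodup := by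
    rw [hkeys]; exact hndS
  have hget : ∀ k ∈ locations, distances.getD k 0 = f k := by
    intro k hk
    rw [hd, PySem.Dict.getD_eq_get?_getD]
    have h2 := get?_foldl_insert_fn (fun l => manhattan_distance coordinates l) locations PySem.Dict.empty k
    simp only at h2
    rw [h2, if_pos hk]
    rfl
  have hitems : distances.items = S.map (fun k => (k, f k)) := by
    rw [PySem.Dict.items_eq_map_keys distances hnd 0, hkeys]
    exact List.map_congr_left (fun k hk => by rw [hget k ((PySem.Set.mem_ofList locations k).mp hk)])
  have hvalues : distances.values = S.map f := by
    show distances.items.map (·.2) = S.map f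
    rw [hitems, List.map_map]; rfl
  -- the minimum
  obtain ⟨m, hm⟩ : ∃ m, PySem.List.min? distances.values (fun v => v) = some m := by
    cases h : PySem.List.min? distances.values (fun v => v) with
    | none =>
      rw [PySem.List.min?_eq_none_iff, hvalues] at h
      have hSnil : S = [] := List.map_eq_nil_iff.mp h
      cases locations with
      | nil => exact absurd rfl hpre
      | cons a t =>
        have ha : a ∈ S := (PySem.Set.mem_ofList (a :: t) a).mpr (by simp)
        rw [hSnil] at ha
        simp at ha
    | some m => exact ⟨m, rfl⟩
  have hmmem : m ∈ S.map f := by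
    have := PySem.List.min?_mem hm; rwa [hvalues] at this
  have hmmin : ∀ y ∈ S.map f, m ≤ y := by
    have := PySem.List.min?_isMin hm; rwa [hvalues] at this
  have hmmem' : m ∈ locations.map f := by
    obtain ⟨k, hk, hfk⟩ := List.mem_map.mp hmmem
    exact List.mem_map.mpr ⟨k, (PySem.Set.mem_ofList locations k).mp hk, hfk⟩
  have hmmin' : ∀ y ∈ locations.map f, m ≤ y := by
    intro y hy
    obtain ⟨k, hk, hfk⟩ := List.mem_map.mp hy
    exact hmmin y (List.mem_map.mpr ⟨k, (PySem.Set.mem_ofList locations k).mpr hk, hfk⟩)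
  -- A's value
  have hA : closest_locations locations coordinates = S.filter (fun k => f k == m) := by
    show (match PySem.List.min? distances.values (fun v => v) with
      | none => []
      | some shortest =>
        distances.items.foldl (fun s p => if p.2 == shortest then PySem.Set.add s p.1 else s) PySem.Set.empty)
      = S.filter (fun k => f k == m)
    rw [hm]
    show distances.items.foldl (fun s p => if p.2 == m then PySem.Set.add s p.1 else s) PySem.Set.empty
      = S.filter (fun k => f k == m)
    rw [hitems, List.foldl_map]
    rw [show (fun (s : PySem.Set (Int × Int)) (k : Int × Int) => if ((k, f k).2 == m) = true then PySem.Set.add s (k, f k).1 else s)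
        = (fun s k => if (f k == m) = true then PySem.Set.add s k else s) from rfl]
    rw [PySem.List.foldl_if_eq_foldl_filter (p := fun k => f k == m) (f := PySem.Set.add),
        show (PySem.Set.empty : PySem.Set (Int × Int)) = ([] : List (Int × Int)) from rfl,
        ← PySem.Set.ofList_eq_foldl,
        PySem.Set.ofList_eq_self_of_nodup _ (hndS.filter _)]
  -- B's value
  have hstep : (fun (st : Option Int × PySem.Set (Int × Int)) location =>
      let d := |location.1 - coordinates.1| + |location.2 - coordinates.2|
      match st.1 with
      | none => (some d, [location])
      | some best =>
        if d < best then (some d, [location])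
        else if d == best then (some best, PySem.Set.add st.2 location)
        else st)
      = bstep f := by
    funext st x
    have hx : |x.1 - coordinates.1| + |x.2 - coordinates.2| = f x := by
      simp [hf, manhattan_distance, abs_sub_comm]
    simp only [bstep, hx]
  have hB : closest_locations_alt locations coordinates
      = PySem.Set.ofList (locations.filter (fun k => f k == m)) := by
    unfold closest_locations_alt
    rw [hstep, b_fold f locations m hmmem' hmmin']
  rw [hA, hB, ofList_filter, hS]

-- ===== VERDICT (by name: the statement is the Claim_ definition above) =====
theorem closest_locations_spec : Claim_equal_closest_locations := by
  intro locations coordinates _ hpre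
  exact main_eq locations coordinates hpre
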